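-- pv_equiv track=rewrite | github.com/tue-robotics/grammar_parser | src/grammar_parser/cfgparser.py | parse_next_atom
-- ===== SOURCE A (Python) =====
-- from typing import Callable, List, MutableMapping, Optional, Tuple, Union, TYPE_CHECKING
--
-- def parse_next_atom(s: str) -> Tuple[str, str, str]:
--     """
--     Returns (name, semantics, remaining_str)
--     For example, for "VP[X, Y] foo bar" it returns:
--
--         ("VP", "X, Y", "foo bar")
--
--     :param s:
--     :return: Tuple with the rule's lname, the variables involved and the remaining text: ("VP", "X, Y", "foo bar")
--     """
--     s = s.strip()
--
--     for i in range(0, len(s)):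
--         c = s[i]
--         if c == " ":
--             return s[:i], "", s[i:].strip()
--         elif c == "[":
--             j = s.find("]", i)
--             if j < 0:
--                 raise Exception
--             return s[:i], s[i + 1 : j], s[j + 1 :].strip()
--
--     return s, "", ""
-- ===== SOURCE B (Python) =====
-- def parse_next_atom(s):
--     """
--     Returns (name, semantics, remaining_str) — index-first decomposition:
--     find the first space and the first '[' once, then compare positions.
--     """
--     s = s.strip()
--     sp = s.find(" ")
--     br = s.find("[")
--     if br != -1 and (sp == -1 or br < sp):
--         j = s.find("]", br)
--         if j < 0:
--             raise Exception
--         return s[:br], s[br + 1 : j], s[j + 1 :].strip()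
--     if sp != -1:
--         return s[:sp], "", s[sp:].strip()
--     return s, "", ""
-- ===== Notes on version B (the rewrite author's own statement) =====
-- stated objective: faster
-- what changed: Replaces A's character-by-character Python loop with two up-front str.find calls whose positions are compared (bracket-first vs space-first), so the scan runs in C instead of interpreted Python.
import Mathlib
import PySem

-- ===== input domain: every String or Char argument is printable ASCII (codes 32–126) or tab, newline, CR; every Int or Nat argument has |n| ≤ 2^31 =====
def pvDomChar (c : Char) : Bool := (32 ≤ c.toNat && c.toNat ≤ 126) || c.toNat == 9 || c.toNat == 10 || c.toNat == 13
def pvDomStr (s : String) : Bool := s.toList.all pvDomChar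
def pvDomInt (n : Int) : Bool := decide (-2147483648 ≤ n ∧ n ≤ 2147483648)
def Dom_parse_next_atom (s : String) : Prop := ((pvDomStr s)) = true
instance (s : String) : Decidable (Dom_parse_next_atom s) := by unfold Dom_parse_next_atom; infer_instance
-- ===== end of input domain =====

-- B replaces A's character-by-character scan with an index-first decomposition: find the first ' ' and the first '[' once, compare their positions, and slice.


-- ===== PORT A =====
-- A's for-loop over range(0, len(s)) with early returns, as structural recursion on the index.
def parseLoopA (t : List Char) (i : Nat) : String × String × String :=
  if h : i < t.length then
    let c := t[i]
    if c = ' ' then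
      (String.ofList (PySem.List.slice t none (some (i : Int))), "",
       String.ofList (PySem.Chars.strip (PySem.List.slice t (some (i : Int)) none)))
    else if c = '[' then
      let j := PySem.Chars.findFrom t [']'] (i : Int)
      if j < 0 then ("", "", "")  -- Python: raise Exception (excluded by Pre_parse_next_atom)
      else (String.ofList (PySem.List.slice t none (some (i : Int))),
            String.ofList (PySem.List.slice t (some ((i : Int) + 1)) (some j)),
            String.ofList (PySem.Chars.strip (PySem.List.slice t (some (j + 1)) none)))
    else parseLoopA t (i + 1)
  else (String.ofList t, "", "")
termination_by t.length - i

def parse_next_atom (s : String) : String × String × String :=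
  let t := (PySem.Str.strip s).toList
  parseLoopA t 0

-- ===== PORT B =====
def parse_next_atom_alt (s : String) : String × String × String :=
  let t := (PySem.Str.strip s).toList
  let sp := PySem.Chars.find t [' ']
  let br := PySem.Chars.find t ['[']
  if br ≠ -1 ∧ (sp = -1 ∨ br < sp) then
    let j := PySem.Chars.findFrom t [']'] br
    if j < 0 then ("", "", "")  -- Python: raise Exception (excluded by Pre_parse_next_atom)
    else (String.ofList (PySem.List.slice t none (some br)),
          String.ofList (PySem.List.slice t (some (br + 1)) (some j)),
          String.ofList (PySem.Chars.strip (PySem.List.slice t (some (j + 1)) none)))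
  else if sp ≠ -1 then
    (String.ofList (PySem.List.slice t none (some sp)), "",
     String.ofList (PySem.Chars.strip (PySem.List.slice t (some sp) none)))
  else (String.ofList t, "", "")

-- ===== PRECONDITION & SPEC =====
-- Pre_ excludes exactly the inputs where A raises Exception: after stripping, a '[' occurs
-- before any space and no ']' follows it (B raises there too).
def Pre_parse_next_atom (s : String) : Prop :=
  PySem.Chars.find (PySem.Str.strip s).toList ['['] = -1 ∨
  (PySem.Chars.find (PySem.Str.strip s).toList [' '] ≠ -1 ∧
   PySem.Chars.find (PySem.Str.strip s).toList [' '] < PySem.Chars.find (PySem.Str.strip s).toList ['[']) ∨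
  PySem.Chars.findFrom (PySem.Str.strip s).toList [']']
    (PySem.Chars.find (PySem.Str.strip s).toList ['[']) ≠ -1
instance (s : String) : Decidable (Pre_parse_next_atom s) := by unfold Pre_parse_next_atom; infer_instance
def pvWitness_parse_next_atom : String := "VP[X, Y] foo bar"

def Spec_parse_next_atom (s : String) (out : String × String × String) : Prop := out = parse_next_atom_alt s
instance (s : String) (out : String × String × String) : Decidable (Spec_parse_next_atom s out) := by unfold Spec_parse_next_atom; infer_instance

-- ===== CLAIM (what is proved, stated in full; the proofs are below) =====
def Claim_equal_parse_next_atom : Prop := ∀ (s : String), Dom_parse_next_atom s → Pre_parse_next_atom s → Spec_parse_next_atom s (parse_next_atom s)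

-- ===== LEMMAS AND PROOFS =====

-- B's body after the three lets, as a function of the two find results.
def pvTarget (t : List Char) (sp br : Int) : String × String × String :=
  if br ≠ -1 ∧ (sp = -1 ∨ br < sp) then
    let j := PySem.Chars.findFrom t [']'] br
    if j < 0 then ("", "", "")
    else (String.ofList (PySem.List.slice t none (some br)),
          String.ofList (PySem.List.slice t (some (br + 1)) (some j)),
          String.ofList (PySem.Chars.strip (PySem.List.slice t (some (j + 1)) none)))
  else if sp ≠ -1 then
    (String.ofList (PySem.List.slice t none (some sp)), "",
     String.ofList (PySem.Chars.strip (PySem.List.slice t (some sp) none)))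
  else (String.ofList t, "", "")

theorem alt_eq_target (s : String) :
    parse_next_atom_alt s = pvTarget (PySem.Str.strip s).toList
      (PySem.Chars.find (PySem.Str.strip s).toList [' '])
      (PySem.Chars.find (PySem.Str.strip s).toList ['[']) := rfl

theorem singleton_infix_iff_mem {c : Char} {l : List Char} : [c] <:+: l ↔ c ∈ l := by
  constructor
  · intro h
    exact h.mem (List.mem_singleton_self c)
  · intro h
    obtain ⟨p, q, rfl⟩ := List.append_of_mem h
    exact ⟨p, q, by simp⟩

theorem find_head_eq_zero {u : List Char} {c : Char} (h : [c] <+: u) :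
    PySem.Chars.find u [c] = 0 := by
  have hnn : 0 ≤ PySem.Chars.find u [c] :=
    (PySem.Chars.find_nonneg_iff u [c]).mpr h.isInfix
  obtain ⟨hpre, hmin⟩ := PySem.Chars.find_spec hnn
  have h0 : (PySem.Chars.find u [c]).toNat = 0 := by
    by_contra hne
    exact hmin 0 (Nat.pos_of_ne_zero hne) (by simpa using h)
  omega

theorem ff_found {t : List Char} {c : Char} {i : Nat} (hi : i < t.length) (hc : t[i] = c) :
    PySem.Chars.findFrom t [c] (i : Int) = (i : Int) := by
  have hd : t.drop i = c :: t.drop (i + 1) := by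
    rw [List.drop_eq_getElem_cons hi, hc]
  have h0 : PySem.Chars.find (t.drop i) [c] = 0 :=
    find_head_eq_zero (by rw [hd]; exact ⟨_, rfl⟩)
  rw [PySem.Chars.findFrom_natCast t [c] i hi.le, h0]
  simp

theorem find_cons_ne {x c : Char} {u : List Char} (hx : x ≠ c) :
    PySem.Chars.find (x :: u) [c] =
      if PySem.Chars.find u [c] = -1 then -1 else PySem.Chars.find u [c] + 1 := by
  by_cases hu : PySem.Chars.find u [c] = -1
  · have hnm : c ∉ u := by
      intro hm
      exact ((PySem.Chars.find_eq_neg_one_iff u [c]).mp hu) (singleton_infix_iff_mem.mpr hm)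
    have : PySem.Chars.find (x :: u) [c] = -1 := by
      rw [PySem.Chars.find_eq_neg_one_iff]
      intro hin
      rcases List.mem_cons.mp (singleton_infix_iff_mem.mp hin) with h | h
      · exact hx h.symm
      · exact hnm h
    rw [this, if_pos hu]
  · rw [if_neg hu]
    have hnnu : 0 ≤ PySem.Chars.find u [c] := by
      have := PySem.Chars.neg_one_le_find u [c]
      omega
    obtain ⟨hpreu, hminu⟩ := PySem.Chars.find_spec hnnu
    have hmem : c ∈ u := singleton_infix_iff_mem.mp (by
      rw [← PySem.Chars.find_ne_neg_one_iff]; exact hu)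
    have hnn : 0 ≤ PySem.Chars.find (x :: u) [c] := by
      rw [PySem.Chars.find_nonneg_iff]
      exact singleton_infix_iff_mem.mpr (List.mem_cons_of_mem x hmem)
    obtain ⟨hpre, hmin⟩ := PySem.Chars.find_spec hnn
    have hmne : (PySem.Chars.find (x :: u) [c]).toNat ≠ 0 := by
      intro h0
      rw [h0] at hpre
      simp only [List.drop_zero] at hpre
      rcases hpre with ⟨r, hr⟩
      injection hr with h1 _
      exact hx h1.symm
    obtain ⟨m', hm'⟩ : ∃ m', (PySem.Chars.find (x :: u) [c]).toNat = m' + 1 :=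
      ⟨(PySem.Chars.find (x :: u) [c]).toNat - 1, by omega⟩
    rw [hm'] at hpre
    have hpre' : [c] <+: u.drop m' := by simpa [List.drop_succ_cons] using hpre
    -- m' equals (find u [c]).toNat by minimality both ways
    have hlow : ¬ m' < (PySem.Chars.find u [c]).toNat := fun hlt => hminu m' hlt hpre'
    have hhigh : ¬ (PySem.Chars.find u [c]).toNat < m' := by
      intro hlt
      have hp2 : [c] <+: (x :: u).drop ((PySem.Chars.find u [c]).toNat + 1) := by
        simpa [List.drop_succ_cons] using hpreu
      exact hmin ((PySem.Chars.find u [c]).toNat + 1) (by omega) hp2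
    omega

theorem ff_step {t : List Char} {c : Char} {i : Nat} (hi : i < t.length) (hc : t[i] ≠ c) :
    PySem.Chars.findFrom t [c] (i : Int) = PySem.Chars.findFrom t [c] ((i + 1 : Nat) : Int) := by
  rw [PySem.Chars.findFrom_natCast t [c] i hi.le, PySem.Chars.findFrom_natCast t [c] (i + 1) hi]
  have hd : t.drop i = t[i] :: t.drop (i + 1) := List.drop_eq_getElem_cons hi
  rw [hd, find_cons_ne hc]
  by_cases h : PySem.Chars.find (t.drop (i + 1)) [c] = -1
  · simp [h]
  · have := PySem.Chars.neg_one_le_find (t.drop (i + 1)) [c]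
    have hge : 0 ≤ PySem.Chars.find (t.drop (i + 1)) [c] := by omega
    rw [if_neg h, if_neg (by omega), if_neg h]
    push_cast
    ring

theorem ff_lb (t : List Char) (sub : List Char) (k : Nat) (hk : k ≤ t.length) :
    PySem.Chars.findFrom t sub (k : Int) = -1 ∨ (k : Int) ≤ PySem.Chars.findFrom t sub (k : Int) := by
  rw [PySem.Chars.findFrom_natCast t sub k hk]
  by_cases h : PySem.Chars.find (t.drop k) sub = -1
  · left; simp [h]
  · right
    have := PySem.Chars.neg_one_le_find (t.drop k) sub
    rw [if_neg h]
    omega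

theorem ff_end (t : List Char) (c : Char) :
    PySem.Chars.findFrom t [c] (t.length : Int) = -1 := by
  rw [PySem.Chars.findFrom_natCast_eq_neg_one_iff t [c] t.length le_rfl]
  intro hin
  rw [List.drop_length] at hin
  have hmem : c ∈ ([] : List Char) := hin.mem (List.mem_singleton_self c)
  simp at hmem

theorem loopA_eq_target (t : List Char) (i : Nat) (hi : i ≤ t.length) :
    parseLoopA t i =
      pvTarget t (PySem.Chars.findFrom t [' '] (i : Int)) (PySem.Chars.findFrom t ['['] (i : Int)) := by
  induction hn : t.length - i using Nat.strong_induction_on generalizing i with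
  | _ n ih =>
  by_cases h : i < t.length
  · by_cases hsp : t[i] = ' '
    · have hspf : PySem.Chars.findFrom t [' '] (i : Int) = (i : Int) := ff_found h hsp
      have hbr1 : PySem.Chars.findFrom t ['['] (i : Int) = PySem.Chars.findFrom t ['['] ((i + 1 : Nat) : Int) :=
        ff_step h (by rw [hsp]; decide)
      have hbr2 := ff_lb t ['['] (i + 1) h
      rw [parseLoopA, dif_pos h, if_pos hsp, hspf, hbr1, pvTarget]
      have hc1 : ¬ (PySem.Chars.findFrom t ['['] ((i + 1 : Nat) : Int) ≠ -1 ∧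
          ((i : Int) = -1 ∨ PySem.Chars.findFrom t ['['] ((i + 1 : Nat) : Int) < (i : Int))) := by
        omega
      have hc2 : (i : Int) ≠ -1 := by omega
      rw [if_neg hc1, if_pos hc2]
    · by_cases hbr : t[i] = '['
      · have hbrf : PySem.Chars.findFrom t ['['] (i : Int) = (i : Int) := ff_found h hbr
        have hsp1 : PySem.Chars.findFrom t [' '] (i : Int) = PySem.Chars.findFrom t [' '] ((i + 1 : Nat) : Int) :=
          ff_step h (by rw [hbr]; decide)
        have hsp2 := ff_lb t [' '] (i + 1) h
        rw [parseLoopA, dif_pos h, if_neg hsp, if_pos hbr, hbrf, hsp1, pvTarget]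
        have hc : (i : Int) ≠ -1 ∧ ((PySem.Chars.findFrom t [' '] ((i + 1 : Nat) : Int) = -1) ∨
            (i : Int) < PySem.Chars.findFrom t [' '] ((i + 1 : Nat) : Int)) := by
          omega
        rw [if_pos hc]
      · have h1 : PySem.Chars.findFrom t [' '] (i : Int) = PySem.Chars.findFrom t [' '] ((i + 1 : Nat) : Int) :=
          ff_step h hsp
        have h2 : PySem.Chars.findFrom t ['['] (i : Int) = PySem.Chars.findFrom t ['['] ((i + 1 : Nat) : Int) :=
          ff_step h hbr
        rw [parseLoopA, dif_pos h, if_neg hsp, if_neg hbr, h1, h2]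
        exact ih (t.length - (i + 1)) (by omega) (i + 1) h rfl
  · have hie : i = t.length := by omega
    subst hie
    rw [parseLoopA, dif_neg h, ff_end, ff_end, pvTarget]
    rw [if_neg (by simp), if_neg (by simp)]

-- ===== VERDICT (by name: the statement is the Claim_ definition above) =====
theorem parse_next_atom_spec : Claim_equal_parse_next_atom := by
  intro s _ _
  unfold Spec_parse_next_atom parse_next_atom
  rw [alt_eq_target]
  have := loopA_eq_target (PySem.Str.strip s).toList 0 (Nat.zero_le _)
  simpa [PySem.Chars.findFrom_zero] using this
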